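-- pv_equiv track=rewrite | github.com/Maxe322/mnforwardbot | forwardbot/service.py | _split_leading_clause
-- ===== SOURCE A (Python) =====
-- def _split_leading_clause(text: str) -> tuple[str, str]:
--     separators = (" — ", " – ", " - ", ": ", ". ", "! ", "? ")
--     earliest_index: int | None = None
--     earliest_separator = ""
--
--     for separator in separators:
--         index = text.find(separator)
--         if index == -1:
--             continue
--         if earliest_index is None or index < earliest_index:
--             earliest_index = index
--             earliest_separator = separator
--
--     if earliest_index is None:
--         return text.strip(), ""
--
--     lead = text[:earliest_index].strip()
--     remainder = text[earliest_index + len(earliest_separator) :].strip()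
--     return lead, remainder
-- ===== SOURCE B (Python) =====
-- def _split_leading_clause(text: str) -> tuple[str, str]:
--     separators = (" — ", " – ", " - ", ": ", ". ", "! ", "? ")
--     for i in range(len(text)):
--         for sep in separators:
--             if text.startswith(sep, i):
--                 return text[:i].strip(), text[i + len(sep):].strip()
--     return text.strip(), ""
-- ===== Notes on version B (the rewrite author's own statement) =====
-- stated objective: alternative
-- what changed: B replaces A's one text.find per separator plus minimum-index bookkeeping by a single left-to-right scan over positions that returns at the first position where any separator starts (tuple order as tie-break).
import Mathlib
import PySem

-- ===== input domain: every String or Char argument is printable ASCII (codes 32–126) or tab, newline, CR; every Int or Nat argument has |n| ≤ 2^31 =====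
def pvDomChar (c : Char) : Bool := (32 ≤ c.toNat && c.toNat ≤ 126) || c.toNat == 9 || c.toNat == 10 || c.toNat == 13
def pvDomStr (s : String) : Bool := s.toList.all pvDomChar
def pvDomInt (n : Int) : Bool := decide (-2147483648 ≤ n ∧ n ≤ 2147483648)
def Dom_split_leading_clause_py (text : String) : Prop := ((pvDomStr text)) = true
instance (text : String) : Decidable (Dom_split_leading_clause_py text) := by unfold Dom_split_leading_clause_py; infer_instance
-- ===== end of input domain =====

-- B replaces A's one-find-per-separator-then-take-the-minimum strategy by a single
-- left-to-right position scan that stops at the first position where any separator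
-- starts (alternative decomposition, same cost class).

-- The separator tuple, shared verbatim by both Pythons.
def pySeps : List String := [" — ", " – ", " - ", ": ", ". ", "! ", "? "]

-- ===== PORT A =====
-- one iteration of A's 'for separator in separators' loop
def pvAStep (l : List Char) (st : Option Int × String) (sep : String) : Option Int × String :=
  let index := PySem.Chars.find l sep.toList
  if index = -1 then st
  else
    match st.1 with
    | none => (some index, sep)
    | some e => if index < e then (some index, sep) else st

def split_leading_clause_py (text : String) : String × String :=
  match pySeps.foldl (pvAStep text.toList) (none, "") with
  | (none, _) => (String.ofList (PySem.Chars.strip text.toList), "")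
  | (some e, sep) =>
      (String.ofList (PySem.Chars.strip (PySem.List.slice text.toList none (some e))),
       String.ofList (PySem.Chars.strip (PySem.List.slice text.toList (some (e + PySem.Str.len sep)) none)))

-- ===== PORT B =====
-- inner loop of B: first separator (in tuple order) starting at this position
def pvFirstMatch (s : List Char) : Option String :=
  pySeps.find? (fun sep => PySem.Chars.startswith s sep.toList)

-- outer loop of B: scan positions left to right (index accumulated on the way back up)
def pvScan : List Char → Option (Nat × String)
  | [] => none
  | c :: t =>
    match pvFirstMatch (c :: t) with
    | some sep => some (0, sep)
    | none => (pvScan t).map (fun p => (p.1 + 1, p.2))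

def split_leading_clause_py_alt (text : String) : String × String :=
  match pvScan text.toList with
  | none => (String.ofList (PySem.Chars.strip text.toList), "")
  | some (i, sep) =>
      (String.ofList (PySem.Chars.strip (text.toList.take i)),
       String.ofList (PySem.Chars.strip (text.toList.drop (i + sep.toList.length))))

-- ===== PRECONDITION & SPEC =====
def Spec_split_leading_clause_py (text : String) (out : String × String) : Prop := out = split_leading_clause_py_alt text
instance (text : String) (out : String × String) : Decidable (Spec_split_leading_clause_py text out) := by unfold Spec_split_leading_clause_py; infer_instance

-- ===== CLAIM (what is proved, stated in full; the proofs are below) =====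
def Claim_equal_split_leading_clause_py : Prop := ∀ (text : String), Dom_split_leading_clause_py text → Spec_split_leading_clause_py text (split_leading_clause_py text)

-- ===== LEMMAS AND PROOFS =====

lemma pvFirstMatch_nil : pvFirstMatch [] = none := by decide

lemma pvFirstMatch_none_iff (s : List Char) :
    pvFirstMatch s = none ↔ ∀ sp ∈ pySeps, ¬ sp.toList <+: s := by
  unfold pvFirstMatch
  rw [List.find?_eq_none]
  constructor
  · intro h sp hsp
    have := h sp hsp
    simpa [PySem.Chars.startswith_iff] using this
  · intro h sp hsp
    simpa [PySem.Chars.startswith_iff] using h sp hsp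

lemma pvScan_none_spec (s : List Char) (h : pvScan s = none) :
    ∀ j, pvFirstMatch (s.drop j) = none := by
  induction s with
  | nil => intro j; simp [pvFirstMatch_nil]
  | cons c t ih =>
    intro j
    unfold pvScan at h
    cases hf : pvFirstMatch (c :: t) with
    | some sep => rw [hf] at h; simp at h
    | none =>
      rw [hf] at h
      cases hs : pvScan t with
      | some p => rw [hs] at h; simp at h
      | none =>
        cases j with
        | zero => simpa using hf
        | succ j' => simpa using ih hs j'

lemma pvScan_some_spec (s : List Char) (i : Nat) (sep : String)
    (h : pvScan s = some (i, sep)) :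
    pvFirstMatch (s.drop i) = some sep ∧ ∀ j < i, pvFirstMatch (s.drop j) = none := by
  induction s generalizing i with
  | nil => simp [pvScan] at h
  | cons c t ih =>
    unfold pvScan at h
    cases hf : pvFirstMatch (c :: t) with
    | some sp =>
      rw [hf] at h
      simp only [Option.some.injEq, Prod.mk.injEq] at h
      obtain ⟨hi, hsp⟩ := h
      subst hi; subst hsp
      exact ⟨by simpa using hf, by omega⟩
    | none =>
      rw [hf] at h
      cases hs : pvScan t with
      | none => rw [hs] at h; simp at h
      | some p =>
        rw [hs] at h
        simp only [Option.map_some, Option.some.injEq] at h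
        obtain ⟨p1, p2⟩ := p
        simp only [Prod.mk.injEq] at h
        obtain ⟨hi, hsp⟩ := h
        subst hsp
        obtain ⟨h1, h2⟩ := ih p1 hs
        constructor
        · rw [← hi]; simpa using h1
        · intro j hj
          cases j with
          | zero => simpa using hf
          | succ j' =>
            have : j' < p1 := by omega
            simpa using h2 j' this

-- sub <:+: l gives a position where sub is a prefix of the rest
lemma infix_exists_prefix_drop (sub l : List Char) (h : sub <:+: l) :
    ∃ j, sub <+: l.drop j := by
  obtain ⟨u, v, rfl⟩ := h
  exact ⟨u.length, by rw [List.append_assoc, List.drop_left]; exact ⟨v, rfl⟩⟩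

-- Python find returns the first occurrence: matching at i and nowhere earlier pins it to i
lemma find_eq_of_first (l sub : List Char) (i : Nat)
    (hp : sub <+: l.drop i) (hmin : ∀ m < i, ¬ sub <+: l.drop m) :
    PySem.Chars.find l sub = (i : Int) := by
  have hinf : sub <:+: l := hp.isInfix.trans (List.drop_suffix i l).isInfix
  have h0 : 0 ≤ PySem.Chars.find l sub := (PySem.Chars.find_nonneg_iff l sub).mpr hinf
  obtain ⟨hpf, hminf⟩ := PySem.Chars.find_spec h0
  have heq : (PySem.Chars.find l sub).toNat = i := by
    rcases lt_trichotomy (PySem.Chars.find l sub).toNat i with hlt | heq | hgt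
    · exact absurd hpf (hmin _ hlt)
    · exact heq
    · exact absurd hp (hminf _ hgt)
  omega

-- if sub matches nowhere before position i, find is -1 or at least i
lemma find_ge_of_no_early (l sub : List Char) (i : Nat)
    (hmin : ∀ m < i, ¬ sub <+: l.drop m) :
    PySem.Chars.find l sub = -1 ∨ (i : Int) ≤ PySem.Chars.find l sub := by
  by_cases h0 : 0 ≤ PySem.Chars.find l sub
  · right
    obtain ⟨hpf, _⟩ := PySem.Chars.find_spec h0
    have : ¬ (PySem.Chars.find l sub).toNat < i := fun hlt => hmin _ hlt hpf
    omega
  · left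
    have := PySem.Chars.neg_one_le_find l sub
    omega

-- A's loop is the identity on separators that do not occur
lemma foldA_id (l : List Char) (L : List String) (st : Option Int × String)
    (h : ∀ sp ∈ L, PySem.Chars.find l sp.toList = -1) :
    L.foldl (pvAStep l) st = st := by
  induction L generalizing st with
  | nil => rfl
  | cons a L ih =>
    have ha := h a (by simp)
    simp only [List.foldl_cons]
    rw [show pvAStep l st a = st by simp [pvAStep, ha]]
    exact ih st (fun sp hsp => h sp (by simp [hsp]))

-- A's loop keeps (some e, s0) when no later separator occurs strictly earlier
lemma foldA_keep (l : List Char) (L : List String) (e : Int) (s0 : String)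
    (h : ∀ sp ∈ L, PySem.Chars.find l sp.toList = -1 ∨ e ≤ PySem.Chars.find l sp.toList) :
    L.foldl (pvAStep l) (some e, s0) = (some e, s0) := by
  induction L with
  | nil => rfl
  | cons a L ih =>
    have ha := h a (by simp)
    simp only [List.foldl_cons]
    have hstep : pvAStep l (some e, s0) a = (some e, s0) := by
      rcases ha with ha | ha
      · simp [pvAStep, ha]
      · have hnlt : ¬ (PySem.Chars.find l a.toList < e) := by omega
        by_cases hne : PySem.Chars.find l a.toList = -1
        · simp [pvAStep, hne]
        · simp [pvAStep, hne, hnlt]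
    rw [hstep]
    exact ih (fun sp hsp => h sp (by simp [hsp]))

-- invariant over A's loop on separators occurring only after position i (or never)
lemma foldA_pre (l : List Char) (L : List String) (i : Int) (hi : 0 ≤ i)
    (h : ∀ sp ∈ L, PySem.Chars.find l sp.toList = -1 ∨ i < PySem.Chars.find l sp.toList) :
    ∀ st : Option Int × String, (st.1 = none ∨ ∃ j, st.1 = some j ∧ i < j) →
      (L.foldl (pvAStep l) st).1 = none ∨ ∃ j, (L.foldl (pvAStep l) st).1 = some j ∧ i < j := by
  induction L with
  | nil => intro st hst; exact hst
  | cons a L ih =>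
    intro st hst
    have ha := h a (by simp)
    simp only [List.foldl_cons]
    apply ih (fun sp hsp => h sp (by simp [hsp]))
    rcases ha with ha | ha
    · simpa [pvAStep, ha] using hst
    · have hne : PySem.Chars.find l a.toList ≠ -1 := by omega
      rcases hst with hnone | ⟨j, hj, hij⟩
      · right
        refine ⟨PySem.Chars.find l a.toList, ?_, ha⟩
        simp [pvAStep, hne, hnone]
      · by_cases hlt : PySem.Chars.find l a.toList < j
        · right
          refine ⟨PySem.Chars.find l a.toList, ?_, ha⟩
          simp [pvAStep, hne, hj, hlt]
        · right
          refine ⟨j, ?_, hij⟩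
          simp [pvAStep, hne, hj, hlt]

-- ===== VERDICT (by name: the statement is the Claim_ definition above) =====
theorem split_leading_clause_py_spec : Claim_equal_split_leading_clause_py := by
  intro text _
  unfold Spec_split_leading_clause_py
  set l := text.toList with hl
  cases hscan : pvScan l with
  | none =>
    have hnone := pvScan_none_spec l hscan
    have hall : ∀ sp ∈ pySeps, PySem.Chars.find l sp.toList = -1 := by
      intro sp hsp
      rw [PySem.Chars.find_eq_neg_one_iff]
      intro hinf
      obtain ⟨j, hj⟩ := infix_exists_prefix_drop _ _ hinf
      exact (pvFirstMatch_none_iff (l.drop j)).mp (hnone j) sp hsp hj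
    unfold split_leading_clause_py split_leading_clause_py_alt
    rw [← hl, hscan, foldA_id l pySeps (none, "") hall]
  | some p =>
    obtain ⟨i, sep⟩ := p
    obtain ⟨hmatch, hearly⟩ := pvScan_some_spec l i sep hscan
    -- no separator matches at any position before i
    have hnoEarly : ∀ sp ∈ pySeps, ∀ m < i, ¬ sp.toList <+: l.drop m := by
      intro sp hsp m hm
      exact (pvFirstMatch_none_iff (l.drop m)).mp (hearly m hm) sp hsp
    -- decompose the separator list at the matching separator
    obtain ⟨hpsep, pre, post, hdecomp, hpre⟩ :=
      List.find?_eq_some_iff_append.mp hmatch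
    have hsepPrefix : sep.toList <+: l.drop i :=
      (PySem.Chars.startswith_iff _ _).mp hpsep
    have hsepMem : sep ∈ pySeps := by rw [hdecomp]; simp
    have hfindSep : PySem.Chars.find l sep.toList = (i : Int) :=
      find_eq_of_first l sep.toList i hsepPrefix
        (fun m hm => hnoEarly sep hsepMem m hm)
    -- separators before sep in the tuple do not match at i either
    have hpreStrict : ∀ sp ∈ pre, PySem.Chars.find l sp.toList = -1 ∨
        (i : Int) < PySem.Chars.find l sp.toList := by
      intro sp hsp
      have hspMem : sp ∈ pySeps := by rw [hdecomp]; simp [hsp]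
      have hnotAt : ¬ sp.toList <+: l.drop i := by
        intro hp
        have hb := hpre sp hsp
        rw [(PySem.Chars.startswith_iff _ _).mpr hp] at hb
        simp at hb
      rcases find_ge_of_no_early l sp.toList i (fun m hm => hnoEarly sp hspMem m hm) with h | h
      · exact Or.inl h
      · right
        rcases lt_or_eq_of_le h with h' | h'
        · exact h'
        · exfalso
          have h0 : 0 ≤ PySem.Chars.find l sp.toList := by omega
          obtain ⟨hpf, _⟩ := PySem.Chars.find_spec h0
          rw [show (PySem.Chars.find l sp.toList).toNat = i by omega] at hpf
          exact hnotAt hpf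
    have hpostGe : ∀ sp ∈ post, PySem.Chars.find l sp.toList = -1 ∨
        (i : Int) ≤ PySem.Chars.find l sp.toList := by
      intro sp hsp
      have hspMem : sp ∈ pySeps := by rw [hdecomp]; simp [hsp]
      exact find_ge_of_no_early l sp.toList i (fun m hm => hnoEarly sp hspMem m hm)
    -- run A's fold: pre leaves the state ≥ i-strict, sep installs (i, sep), post keeps it
    have hfold : pySeps.foldl (pvAStep l) (none, "") = (some (i : Int), sep) := by
      rw [hdecomp, List.foldl_append, List.foldl_cons]
      have hinv := foldA_pre l pre (i : Int) (by positivity) hpreStrict (none, "") (Or.inl rfl)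
      have hstep : pvAStep l (pre.foldl (pvAStep l) (none, "")) sep = (some (i : Int), sep) := by
        have hne : PySem.Chars.find l sep.toList ≠ -1 := by rw [hfindSep]; omega
        rcases hinv with hnone | ⟨j, hj, hij⟩
        · simp [pvAStep, hnone, hfindSep]
        · simp [pvAStep, hj, hfindSep, hij]
      rw [hstep]
      exact foldA_keep l post (i : Int) sep hpostGe
    unfold split_leading_clause_py split_leading_clause_py_alt
    rw [← hl, hscan, hfold]
    dsimp only
    have hlen : PySem.Str.len sep = (sep.toList.length : Int) := by simp
    rw [hlen, show (i : Int) + (sep.toList.length : Int) = ((i + sep.toList.length : Nat) : Int) by push_cast; ring]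
    rw [PySem.List.slice_to l (by positivity), PySem.List.slice_from l (by positivity)]
    rw [Int.toNat_natCast, Int.toNat_natCast]
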